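-- pv_equiv track=rewrite | github.com/Sygaro/tools | r_tools/tools/format_code.py | _brace_lang_remove_unneeded_blanks
-- ===== SOURCE A (Python) =====
-- def _brace_lang_remove_unneeded_blanks(lines: list[str]) -> list[str]:
--     out: list[str] = []
--     n = len(lines)
--     for idx, ln in enumerate(lines):
--         stripped = ln.strip()
--         if stripped == "":
--             prev = lines[idx - 1].strip() if idx > 0 else ""
--             nxt = lines[idx + 1].strip() if idx + 1 < n else ""
--             if prev.endswith("{"):
--                 continue
--             if nxt.startswith("}") or nxt.startswith("};"):
--                 continue
--         out.append(ln)
--     return out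
-- ===== SOURCE B (Python) =====
-- def _brace_lang_remove_unneeded_blanks(lines: list[str]) -> list[str]:
--     # Single streaming pass: lookback via the previous stripped line and the
--     # output buffer, instead of A's index arithmetic with forward lookahead.
--     out: list[str] = []
--     prev = ""
--     for ln in lines:
--         s = ln.strip()
--         if s == "":
--             if not prev.endswith("{"):
--                 out.append(ln)
--         else:
--             if s.startswith("}") and out and out[-1].strip() == "":
--                 out.pop()
--             out.append(ln)
--         prev = s
--     return out
-- ===== Notes on version B (the rewrite author's own statement) =====
-- stated objective: simpler
-- what changed: Replaced A's enumerate loop with index arithmetic and forward lookahead (lines[idx-1]/lines[idx+1]) by a single streaming pass that tracks the previous stripped line and pops one trailing blank off the output buffer when a '}' line arrives.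
import Mathlib
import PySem

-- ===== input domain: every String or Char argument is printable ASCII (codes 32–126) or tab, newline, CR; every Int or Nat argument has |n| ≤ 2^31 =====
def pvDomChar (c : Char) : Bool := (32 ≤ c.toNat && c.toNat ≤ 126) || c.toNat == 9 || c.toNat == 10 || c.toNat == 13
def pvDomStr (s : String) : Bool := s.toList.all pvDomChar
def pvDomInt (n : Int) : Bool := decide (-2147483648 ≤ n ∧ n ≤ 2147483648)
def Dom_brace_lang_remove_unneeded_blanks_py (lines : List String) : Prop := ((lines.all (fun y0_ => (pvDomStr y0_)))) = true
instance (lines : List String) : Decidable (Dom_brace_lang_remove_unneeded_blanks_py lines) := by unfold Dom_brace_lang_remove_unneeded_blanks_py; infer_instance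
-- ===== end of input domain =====

-- B replaces A's index-arithmetic pass with forward lookahead by a single streaming
-- pass that keeps the previous stripped line and pops one trailing blank off the
-- output buffer when a '}' line arrives (objective: simpler decomposition, no indexing).

-- ===== PORT A =====
-- loop body of A's 'for idx, ln in enumerate(lines)' as a named helper
def pvStepA (lines : List String) (n : Int) (out : List String) (p : Int × String) : List String :=
  let idx := p.1
  let ln := p.2
  let stripped := PySem.Str.strip ln
  if stripped = "" then
    let prev := if idx > 0 then PySem.Str.strip ((PySem.List.pyGet? lines (idx - 1)).getD "") else ""
    let nxt := if idx + 1 < n then PySem.Str.strip ((PySem.List.pyGet? lines (idx + 1)).getD "") else ""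
    if PySem.Str.endswith prev "{" then out
    else if PySem.Str.startswith nxt "}" || PySem.Str.startswith nxt "};" then out
    else out ++ [ln]
  else out ++ [ln]

def brace_lang_remove_unneeded_blanks_py (lines : List String) : List String :=
  (PySem.List.enumerate lines).foldl (pvStepA lines (lines.length : Int)) []

-- ===== PORT B =====
-- loop body of B's streaming pass: state = (output buffer, previous stripped line)
def pvStepB (st : List String × String) (ln : String) : List String × String :=
  let out := st.1
  let prev := st.2
  let s := PySem.Str.strip ln
  if s = "" then
    (if PySem.Str.endswith prev "{" then out else out ++ [ln], s)
  else
    let out2 := if PySem.Str.startswith s "}" && !out.isEmpty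
                   && (PySem.Str.strip ((out.getLast?).getD "") == "")
                then out.dropLast else out
    (out2 ++ [ln], s)

def brace_lang_remove_unneeded_blanks_py_alt (lines : List String) : List String :=
  (lines.foldl pvStepB ([], "")).1

-- ===== PRECONDITION & SPEC =====
def Spec_brace_lang_remove_unneeded_blanks_py (lines : List String) (out : List String) : Prop := out = brace_lang_remove_unneeded_blanks_py_alt lines
instance (lines : List String) (out : List String) : Decidable (Spec_brace_lang_remove_unneeded_blanks_py lines out) := by unfold Spec_brace_lang_remove_unneeded_blanks_py; infer_instance

-- ===== CLAIM (what is proved, stated in full; the proofs are below) =====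
def Claim_equal_brace_lang_remove_unneeded_blanks_py : Prop := ∀ (lines : List String), Dom_brace_lang_remove_unneeded_blanks_py lines → Spec_brace_lang_remove_unneeded_blanks_py lines (brace_lang_remove_unneeded_blanks_py lines)

-- ===== LEMMAS AND PROOFS =====

-- stripped head of the remaining lines ('nxt' of A, '' at the end)
def pvNxt : List String → String
  | [] => ""
  | r :: _ => PySem.Str.strip r

-- reference recursion both ports are reduced to
def pvSpec : String → List String → List String
  | _, [] => []
  | prev, l :: rest =>
    if PySem.Str.strip l = "" then
      if PySem.Str.endswith prev "{" then pvSpec "" rest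
      else if PySem.Str.startswith (pvNxt rest) "}" then pvSpec "" rest
      else l :: pvSpec "" rest
    else l :: pvSpec (PySem.Str.strip l) rest

-- A's 'prev' expression at (Nat) position k
def pvPrev (full : List String) (k : Nat) : String :=
  if (k : Int) > 0 then PySem.Str.strip ((PySem.List.pyGet? full ((k : Int) - 1)).getD "") else ""

def pvNoBlankLast (out : List String) : Prop :=
  ∀ x ∈ out.getLast?, PySem.Str.strip x ≠ ""

lemma startswith_brace_semi (s : String) :
    PySem.Str.startswith s "};" = true → PySem.Str.startswith s "}" = true := by
  intro h
  rw [PySem.Str.startswith_eq, PySem.Chars.startswith_iff] at h ⊢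
  exact List.IsPrefix.trans (by decide) h

lemma orBrace (s : String) :
    (PySem.Str.startswith s "}" || PySem.Str.startswith s "};") = PySem.Str.startswith s "}" := by
  cases h : PySem.Str.startswith s "}"
  · cases h2 : PySem.Str.startswith s "};"
    · rw [Bool.or_false]
    · exact absurd (startswith_brace_semi s h2) (by rw [h]; exact fun hc => nomatch hc)
  · rw [Bool.true_or]

lemma stepA_eq (full : List String) (k : Nat) (l : String) (rest out : List String)
    (hnxt : (if (k : Int) + 1 < (full.length : Int)
        then PySem.Str.strip ((PySem.List.pyGet? full ((k : Int) + 1)).getD "") else "")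
        = pvNxt rest) :
    pvStepA full (full.length : Int) out ((k : Int), l) ++ pvSpec (PySem.Str.strip l) rest
      = out ++ pvSpec (pvPrev full k) (l :: rest) := by
  have hstep : pvStepA full (full.length : Int) out ((k : Int), l) =
      (if PySem.Str.strip l = "" then
        (if PySem.Str.endswith (pvPrev full k) "{" then out
         else if (PySem.Str.startswith (if (k : Int) + 1 < (full.length : Int)
              then PySem.Str.strip ((PySem.List.pyGet? full ((k : Int) + 1)).getD "") else "") "}"
            || PySem.Str.startswith (if (k : Int) + 1 < (full.length : Int)
              then PySem.Str.strip ((PySem.List.pyGet? full ((k : Int) + 1)).getD "") else "") "};")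
           then out
         else out ++ [l])
       else out ++ [l]) := rfl
  rw [hstep, hnxt, orBrace]
  simp only [pvSpec]
  by_cases h1 : PySem.Str.strip l = ""
  · rw [if_pos h1, if_pos h1, h1]
    by_cases h2 : PySem.Str.endswith (pvPrev full k) "{" = true
    · rw [if_pos h2, if_pos h2]
    · rw [if_neg h2, if_neg h2]
      by_cases h3 : PySem.Str.startswith (pvNxt rest) "}" = true
      · rw [if_pos h3, if_pos h3]
      · rw [if_neg h3, if_neg h3]; simp
  · rw [if_neg h1, if_neg h1]; simp

lemma loopA_eq (full : List String) : ∀ (ls : List String) (k : Nat) (out : List String),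
    full.drop k = ls →
    (PySem.List.enumerate ls (k : Int)).foldl (pvStepA full (full.length : Int)) out
      = out ++ pvSpec (pvPrev full k) ls := by
  intro ls
  induction ls with
  | nil => intro k out _; simp [PySem.List.enumerate, pvSpec]
  | cons l rest ih =>
    intro k out hdrop
    have hk : k < full.length := by
      by_contra hge
      simp [List.drop_eq_nil_of_le (Nat.le_of_not_lt hge)] at hdrop
    have hget : full[k]? = some l := by
      have h0 : (full.drop k)[0]? = full[k]? := by
        simp [List.getElem?_drop]
      rw [hdrop] at h0; simpa using h0.symm
    have hdrop' : full.drop (k + 1) = rest := by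
      have := congrArg List.tail hdrop
      simpa [List.tail_drop] using this
    have hprev1 : pvPrev full (k + 1) = PySem.Str.strip l := by
      have hpos : ((k + 1 : Nat) : Int) > 0 := by push_cast; omega
      have hc : ((k + 1 : Nat) : Int) - 1 = ((k : Nat) : Int) := by push_cast; ring
      rw [pvPrev, if_pos hpos, hc, PySem.List.pyGet?_natCast, hget]
      rfl
    have hnxt : (if (k : Int) + 1 < (full.length : Int)
        then PySem.Str.strip ((PySem.List.pyGet? full ((k : Int) + 1)).getD "") else "")
        = pvNxt rest := by
      cases rest with
      | nil =>
        have hlen : full.length = k + 1 := by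
          have := congrArg List.length hdrop
          simp [List.length_drop] at this; omega
        have hlt : ¬ ((k : Int) + 1 < (full.length : Int)) := by
          rw [hlen]; push_cast; omega
        rw [if_neg hlt]; rfl
      | cons r rest' =>
        have hget1 : full[k+1]? = some r := by
          have h1 : (full.drop k)[1]? = full[k+1]? := by
            simp [List.getElem?_drop]
          rw [hdrop] at h1; simpa using h1.symm
        have hlen : k + 1 < full.length := (List.getElem?_eq_some_iff.mp hget1).1
        have hcond : ((k : Int) + 1 < (full.length : Int)) := by push_cast; omega
        have hcast : (k : Int) + 1 = ((k + 1 : Nat) : Int) := by push_cast; ring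
        rw [if_pos hcond, hcast, PySem.List.pyGet?_natCast, hget1]; rfl
    rw [PySem.List.enumerate_cons, List.foldl_cons]
    have hcast1 : (k : Int) + 1 = ((k + 1 : Nat) : Int) := by push_cast; ring
    rw [hcast1, ih (k + 1) _ hdrop', hprev1]
    exact stepA_eq full k l rest out hnxt

lemma loopB_eq : ∀ ls : List String,
    (∀ out prev, pvNoBlankLast out → (ls.foldl pvStepB (out, prev)).1 = out ++ pvSpec prev ls) ∧
    (∀ out l, PySem.Str.strip l = "" →
      (ls.foldl pvStepB (out ++ [l], "")).1 = out ++ pvSpec "" (l :: ls)) := by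
  intro ls
  induction ls with
  | nil =>
    constructor
    · intro out prev _; simp [pvSpec]
    · intro out l h1
      simp only [List.foldl_nil, pvSpec, pvNxt]
      rw [if_pos h1, if_neg (by decide : ¬ PySem.Str.endswith "" "{" = true),
        if_neg (by decide : ¬ PySem.Str.startswith "" "}" = true)]
  | cons r rest ih =>
    have hstepB : ∀ (out : List String) (prev r : String), pvStepB (out, prev) r =
        (if PySem.Str.strip r = "" then
          ((if PySem.Str.endswith prev "{" then out else out ++ [r]), PySem.Str.strip r)
         else
          ((if (PySem.Str.startswith (PySem.Str.strip r) "}" && !out.isEmpty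
               && (PySem.Str.strip ((out.getLast?).getD "") == ""))
            then out.dropLast else out) ++ [r], PySem.Str.strip r)) := fun _ _ _ => rfl
    constructor
    · intro out prev hnb
      rw [List.foldl_cons, hstepB]
      by_cases h1 : PySem.Str.strip r = ""
      · rw [if_pos h1, h1]
        by_cases h2 : PySem.Str.endswith prev "{" = true
        · rw [if_pos h2, (ih.1) out "" hnb]
          simp only [pvSpec]
          rw [if_pos h1, if_pos h2]
        · rw [if_neg h2, (ih.2) out r h1]
          simp only [pvSpec]
          rw [if_pos h1, if_neg h2,
            if_neg (by decide : ¬ PySem.Str.endswith "" "{" = true), if_pos h1]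
      · have hc : (PySem.Str.startswith (PySem.Str.strip r) "}" && !out.isEmpty
            && (PySem.Str.strip ((out.getLast?).getD "") == "")) = false := by
          cases hout : out.getLast? with
          | none =>
            have : out = [] := List.getLast?_eq_none_iff.mp hout
            subst this; simp
          | some x =>
            have hx := hnb x (by simp [hout])
            simp [hx]
        rw [if_neg h1, if_neg (ne_true_of_eq_false hc)]
        rw [(ih.1) (out ++ [r]) _ (by intro x hx; simp at hx; subst hx; exact h1)]
        simp only [pvSpec]
        rw [if_neg h1]
        simp
    · intro out l h1
      rw [List.foldl_cons, hstepB]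
      by_cases hr : PySem.Str.strip r = ""
      · rw [if_pos hr, hr,
          if_neg (by decide : ¬ PySem.Str.endswith "" "{" = true)]
        rw [(ih.2) (out ++ [l]) r hr]
        simp only [pvSpec, pvNxt]
        rw [if_pos h1, if_neg (by decide : ¬ PySem.Str.endswith "" "{" = true), hr,
          if_neg (by decide : ¬ PySem.Str.startswith "" "}" = true)]
        simp
        decide
      · by_cases h3 : PySem.Str.startswith (PySem.Str.strip r) "}" = true
        · have hc : (PySem.Str.startswith (PySem.Str.strip r) "}" && !(out ++ [l]).isEmpty
              && (PySem.Str.strip (((out ++ [l]).getLast?).getD "") == "")) = true := by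
            rw [h3, List.getLast?_concat]
            simp [h1]
          rw [if_neg hr, if_pos hc, List.dropLast_concat]
          rw [(ih.1) (out ++ [r]) _ (by intro x hx; simp at hx; subst hx; exact hr)]
          simp only [pvSpec, pvNxt]
          rw [if_pos h1, if_neg (by decide : ¬ PySem.Str.endswith "" "{" = true),
            if_pos h3, if_neg hr]
          simp
        · have hc : (PySem.Str.startswith (PySem.Str.strip r) "}" && !(out ++ [l]).isEmpty
              && (PySem.Str.strip (((out ++ [l]).getLast?).getD "") == "")) = false := by
            cases hb : PySem.Str.startswith (PySem.Str.strip r) "}"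
            · simp
            · exact absurd hb h3
          rw [if_neg hr, if_neg (ne_true_of_eq_false hc)]
          rw [(ih.1) ((out ++ [l]) ++ [r]) _ (by intro x hx; simp at hx; subst hx; exact hr)]
          simp only [pvSpec, pvNxt]
          rw [if_pos h1, if_neg (by decide : ¬ PySem.Str.endswith "" "{" = true),
            if_neg h3, if_neg hr]
          simp
    
lemma portA_eq_spec (lines : List String) :
    brace_lang_remove_unneeded_blanks_py lines = pvSpec "" lines := by
  have h := loopA_eq lines lines 0 [] (by simp)
  simpa [brace_lang_remove_unneeded_blanks_py, pvPrev] using h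

lemma portB_eq_spec (lines : List String) :
    brace_lang_remove_unneeded_blanks_py_alt lines = pvSpec "" lines := by
  have h := (loopB_eq lines).1 [] "" (by intro x hx; simp at hx)
  simpa [brace_lang_remove_unneeded_blanks_py_alt] using h

-- ===== VERDICT (by name: the statement is the Claim_ definition above) =====
theorem brace_lang_remove_unneeded_blanks_py_spec : Claim_equal_brace_lang_remove_unneeded_blanks_py := by
  intro lines _
  unfold Spec_brace_lang_remove_unneeded_blanks_py
  rw [portA_eq_spec, portB_eq_spec]
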